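-- pv_equiv track=rewrite | github.com/scottkmaxwell/papa | papa/utils.py | extract_name_value_pairs
-- ===== SOURCE A (Python) =====
-- def extract_name_value_pairs(args):
--     var_dict = {}
--     while args and '=' in args[0]:
--         arg = args.pop(0)
--         name, value = arg.partition('=')[::2]
--         if value[0] == '"' and value[-1] == '"':
--             value = value[1:-1]
--         var_dict[name] = value
--     return var_dict
-- ===== SOURCE B (Python) =====
-- def extract_name_value_pairs(args):
--     # Stage 1: one forward pass splitting the leading name=value prefix (stop at the
--     # first arg without '='); stage 2: strip the consumed prefix in one slice-delete;
--     # stage 3: build the dict from the collected pairs.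
--     pairs = []
--     for arg in args:
--         name, sep, value = arg.partition('=')
--         if not sep:
--             break
--         pairs.append((name, value))
--     del args[:len(pairs)]
--     var_dict = {}
--     for name, value in pairs:
--         if value.startswith('"') and value.endswith('"'):
--             value = value[1:-1]
--         var_dict[name] = value
--     return var_dict
-- ===== Notes on version B (the rewrite author's own statement) =====
-- stated objective: alternative
-- what changed: A interleaves pop(0), partition, indexed quote-stripping and dict insertion in one while loop; B is a staged pipeline: one for/break pass collecting (name,value) pairs via partition's sep test, a single del args[:len(pairs)], then a dict-building pass using startswith/endswith for the quote strip.
import Mathlib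
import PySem

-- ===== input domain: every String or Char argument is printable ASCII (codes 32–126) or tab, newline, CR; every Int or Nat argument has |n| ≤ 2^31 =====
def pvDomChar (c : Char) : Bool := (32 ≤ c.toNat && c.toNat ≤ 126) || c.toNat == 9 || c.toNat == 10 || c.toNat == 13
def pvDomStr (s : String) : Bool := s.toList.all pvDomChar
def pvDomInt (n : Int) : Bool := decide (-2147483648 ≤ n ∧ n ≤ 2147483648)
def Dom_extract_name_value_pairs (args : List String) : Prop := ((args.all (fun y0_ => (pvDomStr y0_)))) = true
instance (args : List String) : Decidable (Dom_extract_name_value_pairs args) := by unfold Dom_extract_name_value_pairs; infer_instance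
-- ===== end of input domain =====

-- B replaces A's repeated pop(0)/dict loop by a staged pipeline: one pass splitting the
-- '='-prefix into a pairs list, a single del of that prefix, then a dict-building pass
-- (objective: alternative). Both versions mutate `args` the same way whenever A returns;
-- the equivalence proved here is about the RETURN value.


-- ===== PORT A =====
-- hand port of `arg.partition('=')[::2]` (no PySem partition): the pieces before / after the
-- FIRST '='; exact whenever '=' ∈ arg (the only case A's loop reaches)
def pvAPartition (arg : String) : String × String :=
  let i := PySem.Str.find arg "="
  (PySem.Str.slice arg none (some i), PySem.Str.slice arg (some (i + 1)) none)

-- A's while/pop(0) loop as structural recursion on the remaining args, threading the dict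
def pvAGo : List String → PySem.Dict String String → PySem.Dict String String
  | [], d => d
  | a :: rest, d =>
    if PySem.Str.isIn "=" a then
      let nv := pvAPartition a
      let value :=
        match PySem.Str.pyGet? nv.2 0, PySem.Str.pyGet? nv.2 (-1) with
        | some c0, some cl =>
            if c0 = '"' ∧ cl = '"' then PySem.Str.slice nv.2 (some 1) (some (-1)) else nv.2
        | _, _ => nv.2   -- value == "" : Python raises IndexError here (excluded by Pre_)
      pvAGo rest (d.insert nv.1 value)
    else d

def extract_name_value_pairs (args : List String) : List (String × String) :=
  (pvAGo args PySem.Dict.empty).items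

-- ===== PORT B =====
-- hand port of B's `arg.partition('=')` keeping head and tail only (B tests sep separately):
-- splits at the FIRST '=' via span; none = sep was '' ('=' not in arg); exact
def pvSplitEq (arg : String) : Option (String × String) :=
  match arg.toList.dropWhile (· ≠ '=') with
  | [] => none
  | _ :: v => some (String.ofList (arg.toList.takeWhile (· ≠ '=')), String.ofList v)

-- stage 1 of B: the pairs list collected by the for/break loop
def pvBPairs : List String → List (String × String)
  | [] => []
  | a :: rest =>
    match pvSplitEq a with
    | none => []
    | some nv => nv :: pvBPairs rest

-- stage 3 of B: the body of the dict-building for loop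
def pvBInsert (d : PySem.Dict String String) (nv : String × String) : PySem.Dict String String :=
  let value :=
    if PySem.Str.startswith nv.2 "\"" && PySem.Str.endswith nv.2 "\"" then
      PySem.Str.slice nv.2 (some 1) (some (-1))
    else nv.2
  d.insert nv.1 value

def extract_name_value_pairs_alt (args : List String) : List (String × String) :=
  ((pvBPairs args).foldl pvBInsert PySem.Dict.empty).items

-- ===== PRECONDITION & SPEC =====
-- Pre_ excludes exactly the inputs on which Python A raises IndexError: some arg in the
-- leading '='-containing prefix has nothing after its first '=' (value[0] fails).
def Pre_extract_name_value_pairs (args : List String) : Prop :=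
  ∀ a ∈ args.takeWhile (fun a => PySem.Str.isIn "=" a),
    PySem.Str.find a "=" + 1 < PySem.Str.len a
instance (args : List String) : Decidable (Pre_extract_name_value_pairs args) := by
  unfold Pre_extract_name_value_pairs; infer_instance

def pvWitness_extract_name_value_pairs : List String := ["x=1", "y=\"two\"", "rest"]

def Spec_extract_name_value_pairs (args : List String) (out : List (String × String)) : Prop := out = extract_name_value_pairs_alt args
instance (args : List String) (out : List (String × String)) : Decidable (Spec_extract_name_value_pairs args out) := by unfold Spec_extract_name_value_pairs; infer_instance

-- ===== CLAIM (what is proved, stated in full; the proofs are below) =====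
def Claim_equal_extract_name_value_pairs : Prop := ∀ (args : List String), Dom_extract_name_value_pairs args → Pre_extract_name_value_pairs args → Spec_extract_name_value_pairs args (extract_name_value_pairs args)

-- ===== LEMMAS AND PROOFS =====
-- find of a singleton needle lands on the first occurrence
theorem pvFindGo_singleton (t v : List Char) (h : '=' ∉ t) (k : Nat) :
    PySem.Chars.find.go ['='] (t ++ '=' :: v) k = (k + t.length : Nat) := by
  induction t generalizing k with
  | nil => simp [PySem.Chars.find.go, List.isPrefixOf]
  | cons c t ih =>
    have hc : c ≠ '=' := fun hc => h (hc ▸ List.mem_cons_self)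
    simp only [List.cons_append, PySem.Chars.find.go]
    rw [if_neg (by simp [List.isPrefixOf, Ne.symm hc])]
    rw [ih (fun hm => h (List.mem_cons_of_mem _ hm))]
    simp only [List.length_cons]
    push_cast; ring

theorem pvFind_singleton (t v : List Char) (h : '=' ∉ t) :
    PySem.Chars.find (t ++ '=' :: v) ['='] = (t.length : Int) := by
  have := pvFindGo_singleton t v h 0
  simpa [PySem.Chars.find] using this

-- no '=' in a  →  B's splitter yields none
theorem pvSplitEq_none (a : String) (h : PySem.Str.isIn "=" a = false) :
    pvSplitEq a = none := by
  have hm : '=' ∉ a.toList := by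
    intro hmem
    have hinf : ¬ ("=".toList <:+: a.toList) :=
      (PySem.Chars.isIn_eq_false_iff _ _).mp (by simpa [PySem.Str.isIn] using h)
    exact hinf (by simpa using (List.singleton_infix_iff '=' a.toList).mpr hmem)
  unfold pvSplitEq
  rw [List.dropWhile_eq_nil_iff.mpr (fun x hx => by
    simp only [decide_eq_true_eq]
    exact fun hxe => hm (hxe ▸ hx))]

-- '=' in a  →  B's splitter returns exactly A's partition pieces
-- the head of a non-nil dropWhile fails the predicate
theorem pvDropWhile_head (p : Char → Bool) (l : List Char) (c : Char) (v : List Char)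
    (h : l.dropWhile p = c :: v) : p c = false := by
  induction l with
  | nil => simp at h
  | cons a t ih =>
    rw [List.dropWhile_cons] at h
    by_cases hp : p a
    · exact ih (by simpa [hp] using h)
    · simp only [hp, Bool.false_eq_true, if_false, List.cons.injEq] at h
      rw [← h.1]
      simpa using hp

-- '=' in a  →  B's splitter returns exactly A's partition pieces
theorem pvSplitEq_some (a : String) (h : PySem.Str.isIn "=" a = true) :
    pvSplitEq a = some (pvAPartition a) := by
  have hm : '=' ∈ a.toList := by
    have hinf : "=".toList <:+: a.toList :=
      (PySem.Chars.isIn_iff_infix _ _).mp (by simpa [PySem.Str.isIn] using h)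
    exact (List.singleton_infix_iff '=' a.toList).mp (by simpa using hinf)
  obtain ⟨t, hgen⟩ : ∃ t, a.toList.takeWhile (fun x => decide (x ≠ '=')) = t := ⟨_, rfl⟩
  have hnt : '=' ∉ t := by
    rw [← hgen]
    intro hx
    have := List.mem_takeWhile_imp hx
    simp at this
  cases hdw : a.toList.dropWhile (fun x => decide (x ≠ '=')) with
  | nil =>
    have hta : t = a.toList := by
      conv_rhs => rw [← List.takeWhile_append_dropWhile (p := fun x => decide (x ≠ '=')) (l := a.toList)]
      rw [hdw, List.append_nil, hgen]
    exact absurd (show '=' ∈ t by rw [hta]; exact hm) hnt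
  | cons c v =>
    have hc : c = '=' := by
      have := pvDropWhile_head _ _ _ _ hdw
      simpa using this
    subst hc
    have hdecomp : a.toList = t ++ '=' :: v := by
      rw [← hgen, ← hdw, List.takeWhile_append_dropWhile]
    have hfind : PySem.Str.find a "=" = (t.length : Int) := by
      rw [PySem.Str.find_eq, show ("=".toList : List Char) = ['='] from rfl, hdecomp]
      exact pvFind_singleton _ _ hnt
    unfold pvSplitEq pvAPartition
    rw [hdw, hgen]
    refine congrArg some (Prod.ext ?_ ?_)
    · apply String.toList_inj.mp
      rw [String.toList_ofList, PySem.Str.toList_slice, PySem.Chars.slice_eq_listSlice, hfind,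
        PySem.List.slice_to _ (by positivity), Int.toNat_natCast, hdecomp, List.take_left]
    · apply String.toList_inj.mp
      rw [String.toList_ofList, PySem.Str.toList_slice, PySem.Chars.slice_eq_listSlice, hfind,
        PySem.List.slice_from _ (by positivity), hdecomp,
        show ((t.length : Int) + 1).toNat = (t ++ ['=']).length by simp,
        show t ++ '=' :: v = (t ++ ['=']) ++ v by simp, List.drop_left]

-- A's quote-stripping expression = B's (both return the value unchanged when it is empty)
theorem pvQuote_eq (v : String) :
    (match PySem.Str.pyGet? v 0, PySem.Str.pyGet? v (-1) with
      | some c0, some cl =>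
          if c0 = '"' ∧ cl = '"' then PySem.Str.slice v (some 1) (some (-1)) else v
      | _, _ => v) =
    (if PySem.Str.startswith v "\"" && PySem.Str.endswith v "\"" then
        PySem.Str.slice v (some 1) (some (-1)) else v) := by
  rw [PySem.Str.pyGet?_eq, PySem.Str.pyGet?_eq, PySem.Chars.pyGet?_eq_listPyGet?,
    PySem.Chars.pyGet?_eq_listPyGet?, PySem.List.pyGet?_zero, PySem.List.pyGet?_neg_one]
  cases hl : v.toList with
  | nil =>
    have hsw : PySem.Str.startswith v "\"" = false := by
      rw [PySem.Str.startswith_eq, hl]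
      cases hb : PySem.Chars.startswith [] "\"".toList
      · rfl
      · exact absurd ((PySem.Chars.startswith_iff _ _).mp hb) (by simp [List.IsPrefix])
    rw [hsw]
    simp [hl]
  | cons c cs =>
    obtain ⟨g, hg⟩ : ∃ g, (c :: cs).getLast? = some g :=
      ⟨_, List.getLast?_eq_some_getLast (by simp)⟩
    rw [hg, show ((c :: cs))[0]? = some c from rfl]
    have hsw : PySem.Str.startswith v "\"" = decide (c = '"') := by
      rw [PySem.Str.startswith_eq, hl]
      cases hd : decide (c = '"') with
      | true =>
        simp only [decide_eq_true_eq] at hd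
        subst hd
        exact (PySem.Chars.startswith_iff _ _).mpr ⟨cs, rfl⟩
      | false =>
        simp only [decide_eq_false_iff_not] at hd
        cases hb : PySem.Chars.startswith (c :: cs) "\"".toList
        · rfl
        · exact absurd ((PySem.Chars.startswith_iff _ _).mp hb)
            (by intro hp; exact hd (by simpa using (List.cons_prefix_cons.mp hp).1.symm))
    have hew : PySem.Str.endswith v "\"" = decide (g = '"') := by
      rw [PySem.Str.endswith_eq, hl]
      cases hd : decide (g = '"') with
      | true =>
        simp only [decide_eq_true_eq] at hd
        subst hd
        obtain ⟨l', hl'⟩ := List.getLast?_eq_some_iff.mp hg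
        exact (PySem.Chars.endswith_iff _ _).mpr ⟨l', hl'.symm⟩
      | false =>
        simp only [decide_eq_false_iff_not] at hd
        cases hb : PySem.Chars.endswith (c :: cs) "\"".toList
        · rfl
        · obtain ⟨tt, htt⟩ := (PySem.Chars.endswith_iff _ _).mp hb
          rw [← htt] at hg
          exact absurd (by simpa using hg : ('"' : Char) = g) (fun hh => hd hh.symm)
    rw [hsw, hew]
    by_cases h1 : c = '"' <;> by_cases h2 : g = '"' <;> simp [h1, h2]

-- A's while/pop loop is the fold of B's insert step over B's pairs list
theorem pvAGo_eq (args : List String) (d : PySem.Dict String String) :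
    pvAGo args d = (pvBPairs args).foldl pvBInsert d := by
  induction args generalizing d with
  | nil => rfl
  | cons a rest ih =>
    cases h : PySem.Str.isIn "=" a with
    | false =>
      simp only [pvAGo, h, Bool.false_eq_true, if_false, pvBPairs, pvSplitEq_none a h,
        List.foldl_nil]
    | true =>
      simp only [pvAGo, h, if_true, pvBPairs, pvSplitEq_some a h, List.foldl_cons, ih]
      rw [pvQuote_eq]
      rfl

-- ===== VERDICT (by name: the statement is the Claim_ definition above) =====
theorem extract_name_value_pairs_spec : Claim_equal_extract_name_value_pairs := by
  intro args _ _
  unfold Spec_extract_name_value_pairs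
  simp only [extract_name_value_pairs, extract_name_value_pairs_alt, pvAGo_eq]
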